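-- pv_equiv track=rewrite | github.com/yeogirlyun/enhanced-poker-strategy-system | json_to_markdown.py | format_preflop_hs
-- ===== SOURCE A (Python) =====
-- def format_preflop_hs(hs_table):
--     """Formats the preflop HS table into tiers for memorization."""
--     tiers = {
--         "Tier 1: Elite Hands (HS 30+)": [], "Tier 2: Premium Hands (HS 20-25)": [],
--         "Tier 3: Gold Hands (HS 15)": [], "Tier 4: Silver Hands (HS 10)": [],
--         "Tier 5: Speculative Hands (HS 5)": [],
--     }
--     for hand, hs in sorted(hs_table.items(), key=lambda item: item[1], reverse=True):
--         if hs >= 30: tiers["Tier 1: Elite Hands (HS 30+)"].append(f"{hand} ({hs})")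
--         elif hs >= 20: tiers["Tier 2: Premium Hands (HS 20-25)"].append(f"{hand} ({hs})")
--         elif hs == 15: tiers["Tier 3: Gold Hands (HS 15)"].append(f"{hand} ({hs})")
--         elif hs == 10: tiers["Tier 4: Silver Hands (HS 10)"].append(f"{hand} ({hs})")
--         elif hs == 5: tiers["Tier 5: Speculative Hands (HS 5)"].append(f"{hand} ({hs})")
--
--     md = "## Preflop Hand Strength (HS)\n\n"
--     for tier_name, hands in tiers.items():
--         md += f"### {tier_name}\n"
--         md += "- " + ", ".join(hands) + "\n\n"
--     return md
-- ===== SOURCE B (Python) =====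
-- TIERS = [
--     ("Tier 1: Elite Hands (HS 30+)", lambda hs: hs >= 30),
--     ("Tier 2: Premium Hands (HS 20-25)", lambda hs: 20 <= hs < 30),
--     ("Tier 3: Gold Hands (HS 15)", lambda hs: hs == 15),
--     ("Tier 4: Silver Hands (HS 10)", lambda hs: hs == 10),
--     ("Tier 5: Speculative Hands (HS 5)", lambda hs: hs == 5),
-- ]
--
--
-- def format_preflop_hs(hs_table):
--     """Formats the preflop HS table into tiers for memorization."""
--     md = "## Preflop Hand Strength (HS)\n\n"
--     for name, pred in TIERS:
--         members = sorted(
--             (item for item in hs_table.items() if pred(item[1])),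
--             key=lambda it: it[1], reverse=True,
--         )
--         md += f"### {name}\n- " + ", ".join(f"{h} ({v})" for h, v in members) + "\n\n"
--     return md
-- ===== Notes on version B (the rewrite author's own statement) =====
-- stated objective: alternative
-- what changed: Instead of one global descending sort followed by an if/elif classification scan into a dict of tier lists, B loops over the five fixed tier headers and for each one filters the table by that tier's exact hs predicate, stably sorts just that subset descending, and appends the formatted tier section.
import Mathlib
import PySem

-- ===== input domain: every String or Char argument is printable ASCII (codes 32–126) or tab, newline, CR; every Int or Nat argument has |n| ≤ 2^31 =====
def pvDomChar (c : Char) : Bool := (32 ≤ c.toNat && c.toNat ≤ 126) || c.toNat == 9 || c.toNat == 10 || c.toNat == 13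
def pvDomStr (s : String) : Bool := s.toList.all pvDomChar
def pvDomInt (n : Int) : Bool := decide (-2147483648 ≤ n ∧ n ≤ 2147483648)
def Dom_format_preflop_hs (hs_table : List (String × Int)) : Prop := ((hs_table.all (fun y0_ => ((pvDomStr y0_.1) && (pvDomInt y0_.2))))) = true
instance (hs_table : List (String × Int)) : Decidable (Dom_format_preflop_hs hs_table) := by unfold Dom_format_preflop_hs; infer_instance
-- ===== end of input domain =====

-- B restructures A: instead of one global descending sort + an if/elif classification scan,
-- B filters and sorts each of the five fixed tiers separately (objective: alternative decomposition).

-- f"{hand} ({hs})" — shared by both Pythons verbatim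
def pvEntry (it : String × Int) : String := it.1 ++ " (" ++ PySem.Int.toStr it.2 ++ ")"

-- ===== PORT A =====
-- A's `tiers` dict has five FIXED literal keys inserted once up front; it is represented as a
-- 5-tuple of lists in that fixed insertion order (exact: iteration order of the dict is exactly this order).
def pvLoopA : List (String × Int) → (List String × List String × List String × List String × List String) → (List String × List String × List String × List String × List String)
  | [], t => t
  | (hand, hs) :: rest, (t1, t2, t3, t4, t5) =>
    if hs ≥ 30 then pvLoopA rest (t1 ++ [pvEntry (hand, hs)], t2, t3, t4, t5)
    else if hs ≥ 20 then pvLoopA rest (t1, t2 ++ [pvEntry (hand, hs)], t3, t4, t5)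
    else if hs = 15 then pvLoopA rest (t1, t2, t3 ++ [pvEntry (hand, hs)], t4, t5)
    else if hs = 10 then pvLoopA rest (t1, t2, t3, t4 ++ [pvEntry (hand, hs)], t5)
    else if hs = 5 then pvLoopA rest (t1, t2, t3, t4, t5 ++ [pvEntry (hand, hs)])
    else pvLoopA rest (t1, t2, t3, t4, t5)

def format_preflop_hs (hs_table : List (String × Int)) : String :=
  let s := PySem.List.sorted hs_table (fun item => item.2) true
  let t := pvLoopA s ([], [], [], [], [])
  let md := "## Preflop Hand Strength (HS)\n\n"
  let md := md ++ ("### " ++ "Tier 1: Elite Hands (HS 30+)" ++ "\n") ++ ("- " ++ PySem.Str.join ", " t.1 ++ "\n\n")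
  let md := md ++ ("### " ++ "Tier 2: Premium Hands (HS 20-25)" ++ "\n") ++ ("- " ++ PySem.Str.join ", " t.2.1 ++ "\n\n")
  let md := md ++ ("### " ++ "Tier 3: Gold Hands (HS 15)" ++ "\n") ++ ("- " ++ PySem.Str.join ", " t.2.2.1 ++ "\n\n")
  let md := md ++ ("### " ++ "Tier 4: Silver Hands (HS 10)" ++ "\n") ++ ("- " ++ PySem.Str.join ", " t.2.2.2.1 ++ "\n\n")
  let md := md ++ ("### " ++ "Tier 5: Speculative Hands (HS 5)" ++ "\n") ++ ("- " ++ PySem.Str.join ", " t.2.2.2.2 ++ "\n\n")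
  md

-- ===== PORT B =====
def pvTiersB : List (String × (Int → Bool)) :=
  [ ("Tier 1: Elite Hands (HS 30+)", fun hs => decide (30 ≤ hs)),
    ("Tier 2: Premium Hands (HS 20-25)", fun hs => decide (20 ≤ hs) && decide (hs < 30)),
    ("Tier 3: Gold Hands (HS 15)", fun hs => decide (hs = 15)),
    ("Tier 4: Silver Hands (HS 10)", fun hs => decide (hs = 10)),
    ("Tier 5: Speculative Hands (HS 5)", fun hs => decide (hs = 5)) ]

def pvSectionB (hs_table : List (String × Int)) (name : String) (pred : Int → Bool) : String :=
  let members := PySem.List.sorted (hs_table.filter (fun it => pred it.2)) (fun it => it.2) true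
  ("### " ++ name ++ "\n- ") ++ PySem.Str.join ", " (members.map pvEntry) ++ "\n\n"

def format_preflop_hs_alt (hs_table : List (String × Int)) : String :=
  pvTiersB.foldl (fun md t => md ++ pvSectionB hs_table t.1 t.2) "## Preflop Hand Strength (HS)\n\n"

-- ===== PRECONDITION & SPEC =====
def Spec_format_preflop_hs (hs_table : List (String × Int)) (out : String) : Prop := out = format_preflop_hs_alt hs_table
instance (hs_table : List (String × Int)) (out : String) : Decidable (Spec_format_preflop_hs hs_table out) := by unfold Spec_format_preflop_hs; infer_instance

-- ===== CLAIM (what is proved, stated in full; the proofs are below) =====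
def Claim_equal_format_preflop_hs : Prop := ∀ (hs_table : List (String × Int)), Dom_format_preflop_hs hs_table → Spec_format_preflop_hs hs_table (format_preflop_hs hs_table)

-- ===== LEMMAS AND PROOFS =====

-- A's classification loop computes, for each tier, the accumulator followed by the
-- formatted entries of the elements satisfying that tier's predicate, in scan order.
theorem pvLoopA_spec (l : List (String × Int)) (t1 t2 t3 t4 t5 : List String) :
    pvLoopA l (t1, t2, t3, t4, t5) =
      (t1 ++ (l.filter (fun it => decide (30 ≤ it.2))).map pvEntry,
       t2 ++ (l.filter (fun it => decide (20 ≤ it.2) && decide (it.2 < 30))).map pvEntry,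
       t3 ++ (l.filter (fun it => decide (it.2 = 15))).map pvEntry,
       t4 ++ (l.filter (fun it => decide (it.2 = 10))).map pvEntry,
       t5 ++ (l.filter (fun it => decide (it.2 = 5))).map pvEntry) := by
  induction l generalizing t1 t2 t3 t4 t5 with
  | nil => simp [pvLoopA]
  | cons x rest ih =>
    obtain ⟨hand, hs⟩ := x
    by_cases h1 : hs ≥ 30
    · have e1 : decide (30 ≤ hs) = true := by simp; omega
      have e2 : (decide (20 ≤ hs) && decide (hs < 30)) = false := by simp; omega
      have e3 : decide (hs = 15) = false := by simp; omega
      have e4 : decide (hs = 10) = false := by simp; omega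
      have e5 : decide (hs = 5) = false := by simp; omega
      simp [pvLoopA, h1, ih, e2, e3, e4, e5]
    · by_cases h2 : hs ≥ 20
      · have e1 : decide (30 ≤ hs) = false := by simp; omega
        have hlt : hs < 30 := by omega
        have e2 : (decide (20 ≤ hs) && decide (hs < 30)) = true := by simp; omega
        have e3 : decide (hs = 15) = false := by simp; omega
        have e4 : decide (hs = 10) = false := by simp; omega
        have e5 : decide (hs = 5) = false := by simp; omega
        simp [pvLoopA, h1, h2, hlt, ih, e3, e4, e5]
      · by_cases h3 : hs = 15
        · simp [pvLoopA, h3, ih]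
        · by_cases h4 : hs = 10
          · simp [pvLoopA, h4, ih]
          · by_cases h5 : hs = 5
            · simp [pvLoopA, h5, ih]
            · simp [pvLoopA, h1, h2, h3, h4, h5, ih]

-- Filtering commutes with a single stable insertion into a descending-ordered list.
theorem pvFilter_insertBy {α : Type} (key : α → Int) (p : α → Bool) (x : α) (S : List α)
    (hS : S.Pairwise (fun a b => key b ≤ key a)) :
    (PySem.List.insertBy (fun a b => decide (key b < key a)) x S).filter p =
      if p x then PySem.List.insertBy (fun a b => decide (key b < key a)) x (S.filter p)
      else S.filter p := by
  induction S with
  | nil => cases hpx : p x <;> simp [PySem.List.insertBy, List.filter, hpx]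
  | cons y ys ih =>
    have hpw := (List.pairwise_cons.mp hS).1
    have htl := (List.pairwise_cons.mp hS).2
    by_cases hlt : key y < key x
    · -- x is inserted in front
      have hb : decide (key y < key x) = true := by simpa using hlt
      cases hpx : p x
      · simp [PySem.List.insertBy, hb, List.filter_cons, hpx]
      · -- every kept element of y::ys has key < key x
        have hall : ∀ z ∈ (y :: ys).filter p, decide (key z < key x) = true := by
          intro z hz
          have hz' := List.mem_of_mem_filter hz
          rcases List.mem_cons.mp hz' with rfl | hz''
          · simpa using hlt
          · have := hpw _ hz''
            simp only [decide_eq_true_eq]; omega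
        simp only [PySem.List.insertBy, hb]
        cases hf : (y :: ys).filter p with
        | nil => simp [hpx, hf, PySem.List.insertBy]
        | cons z zs =>
          have hz : decide (key z < key x) = true := hall z (by rw [hf]; exact List.mem_cons_self ..)
          simp [hpx, hf, PySem.List.insertBy, hz]
    · have hb : decide (key y < key x) = false := by simpa using hlt
      cases hpy : p y
      · simp only [PySem.List.insertBy, hb, Bool.false_eq_true, if_false,
          List.filter_cons, hpy, ih htl]
      · cases hpx : p x
        · simp [PySem.List.insertBy, hb, hpy, ih htl, hpx]
        · simp [PySem.List.insertBy, hb, hpy, ih htl, hpx]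

-- Filtering commutes with the stable descending sort.
theorem pvFilter_sorted (xs : List (String × Int)) (p : (String × Int) → Bool) :
    (PySem.List.sorted xs (fun it => it.2) true).filter p =
      PySem.List.sorted (xs.filter p) (fun it => it.2) true := by
  induction xs using List.reverseRecOn with
  | nil => simp [PySem.List.sorted_rev_eq_foldl_insertBy]
  | append_singleton xs x ih =>
    have hpair : (PySem.List.sorted xs (fun it => it.2) true).Pairwise
        (fun a b => b.2 ≤ a.2) := PySem.List.sorted_pairwise_rev xs (fun it => it.2)
    rw [PySem.List.sorted_rev_eq_foldl_insertBy (xs ++ [x]), List.foldl_append,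
      ← PySem.List.sorted_rev_eq_foldl_insertBy xs]
    simp only [List.foldl_cons, List.foldl_nil]
    rw [pvFilter_insertBy (fun it => it.2) p x _ hpair, ih, List.filter_append]
    cases hpx : p x
    · simp [hpx]
    · simp only [hpx, if_true, List.filter_cons, List.filter_nil]
      rw [PySem.List.sorted_rev_eq_foldl_insertBy (xs.filter p ++ [x]), List.foldl_append,
        ← PySem.List.sorted_rev_eq_foldl_insertBy (xs.filter p)]
      simp

-- ===== VERDICT (by name: the statement is the Claim_ definition above) =====
theorem format_preflop_hs_spec : Claim_equal_format_preflop_hs := by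
  intro hs_table _
  show format_preflop_hs hs_table = format_preflop_hs_alt hs_table
  unfold format_preflop_hs format_preflop_hs_alt pvTiersB pvSectionB
  simp only [List.foldl_cons, List.foldl_nil, pvLoopA_spec, List.nil_append,
    pvFilter_sorted]
  simp [← String.append_assoc]
  simp [String.append_assoc]
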